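/- GENERATED by mk_final_copies.py from the proof of the farm's unit `start_decoder.C11c` (farm:start_decoder.C11c.1: Lemmas.lean) as the
   re-elaboration sweep compiled it — do not edit. -/
import Asan.CheckWalk
import Vorbis.Spec.Reader
import Vorbis.Spec.StartDecoderC4
import Vorbis.Spec.Units.start_decoder_C11c

open X86 X86.User Asan Vorbis Vorbis.Spec Vorbis.Spec.StartDecoder

set_option maxRecDepth 4000
set_option maxHeartbeats 4000000

namespace Vorbis.Spec.start_decoder_C11c

/-- A window segment C11c writes: the stack below the steady `R` (the pushed return addresses, lookup1_values' frame), the byte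
`sequence_p` (`[c + 26]`), the dword `lookup_values` (`[c + 28, c + 32)`). -/
def Win11c (g : Ghost) (c : Nat) (w : Span) : Prop :=
  (g.R - 408 ≤ w.lo ∧ w.hi ≤ g.R) ∨ (c + 26 ≤ w.lo ∧ w.hi ≤ c + 27) ∨ (c + 28 ≤ w.lo ∧ w.hi ≤ c + 32)

/-- **The carry of segment C11c**: over stores into `Win11c` windows, `C11.core11`'s conclusion and the two fields of `[c + 16, c + 26)`
the assertions read (`lookup_type`, `value_bits`). -/
theorem carry11c {u₀ : State} {g : Ghost} {i : Nat} {A2 A3 Ai : Arena} {A : Arena × List Obj} {pc pc' : Word} {v w : State}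
    {ws : List Span} (hat : In11P u₀ g i A2 A3 Ai A pc v)
    (hs : Mem.SameExcept ws v.mem w.mem) (hun : ShadowUntouched v.mem w.mem)
    (hq : ∀ x, x ∈ ws → Win11c g (g.cb v.mem i) x)
    (hrip : w.rip = pc') (hrsp : w.reg .rsp = v.reg .rsp) (hcode : CodeOK u₀ w.mem) (hinv : abiInv w)
    (hr14 : w.reg .r14 = v.reg .r14) :
    (Frame u₀ g pc' A w ∧ Cur g i A2 A3 Ai A w ∧ g.cb w.mem i = g.cb v.mem i ∧
      K15 (Since Ai A.1) w.mem (g.cb v.mem i) ∧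
      Codebook.dimensions w.mem (g.cb v.mem i) = Codebook.dimensions v.mem (g.cb v.mem i) ∧
      Codebook.entries w.mem (g.cb v.mem i) = Codebook.entries v.mem (g.cb v.mem i) ∧
      Codebook.multiplicands w.mem (g.cb v.mem i) = Codebook.multiplicands v.mem (g.cb v.mem i)) ∧
      Codebook.lookup_type w.mem (g.cb v.mem i) = Codebook.lookup_type v.mem (g.cb v.mem i) ∧
      Codebook.value_bits w.mem (g.cb v.mem i) = Codebook.value_bits v.mem (g.cb v.mem i) := by
  have hpos : Pos g A := Pos.of hat.frame hat.cur
  have hm0 : MInv g i A2 A3 Ai A v.mem := MInv.of hat.frame hat.cur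
  have hcw := hm0.c_where
  have p1 := hpos.r_eq
  have p2 := hpos.ra_lo
  have p3 := hpos.ra_hi
  have hq11 : ∀ x, x ∈ ws → C11.QuietWin11 g (g.cb v.mem i) x := by
    intro x hx
    have k := hq x hx
    unfold Win11c at k
    unfold C11.QuietWin11
    omega
  have hb : Bits (g.Blk A) g.len w.mem g.f := by
    refine bits_kept hpos hat.cur.sd.bits hs ?_
    intro x hx
    have k := hq x hx
    unfold Win11c at k
    omega
  refine ⟨C11.core11 hat.frame hat.cur hat.k hs hun hq11 hb hrip hrsp hcode hinv hr14, ?_, ?_⟩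
  · have heq : Mem.EqOn (g.cb v.mem i + 25) (g.cb v.mem i + 26) v.mem w.mem := by
      apply hs.eqOn
      intro x hx
      have k := hq x hx
      unfold Win11c at k
      omega
    simp only [vacc, voff]
    exact heq.u8 _ (Nat.le_refl _) (by omega) (by omega)
  · have heq : Mem.EqOn (g.cb v.mem i + 24) (g.cb v.mem i + 25) v.mem w.mem := by
      apply hs.eqOn
      intro x hx
      have k := hq x hx
      unfold Win11c at k
      omega
    simp only [vacc, voff]
    exact heq.u8 _ (Nat.le_refl _) (by omega) (by omega)

/-- The 32-bit `imul` of 0x114c5e does not wrap: `entries ≥ 0`, `dimensions ≥ 1` and FIX 3's `entries · dimensions ≤ 1FFFFFFFH`. -/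
theorem prod32 (e d : Nat) (he : e < 2 ^ 32) (hd : d < 2 ^ 32) (h0 : 0 ≤ sint32 e) (h1 : 1 ≤ sint32 d)
    (hp : sint32 e * sint32 d ≤ 0x1FFFFFFF) :
    ((BitVec.ofNat 32 e * BitVec.ofNat 32 d).toNat : Int) = sint32 e * sint32 d ∧
      (BitVec.ofNat 32 e * BitVec.ofNat 32 d).toNat < 2 ^ 30 := by
  have ce := sint32_cases e
  have cd := sint32_cases d
  have ee : sint32 e = (e : Int) := by omega
  have ed : sint32 d = (d : Int) := by omega
  rw [ee, ed] at hp
  rw [ee, ed]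
  have hpn : e * d ≤ 0x1FFFFFFF := by
    have : ((e * d : Nat) : Int) ≤ 0x1FFFFFFF := by
      rw [Int.natCast_mul]
      exact hp
    omega
  have hm : (BitVec.ofNat 32 e * BitVec.ofNat 32 d).toNat = e * d := by
    rw [BitVec.toNat_mul, BitVec.toNat_ofNat, BitVec.toNat_ofNat, Nat.mod_eq_of_lt he, Nat.mod_eq_of_lt hd]
    exact Nat.mod_eq_of_lt (by omega)
  rw [hm]
  refine ⟨Int.natCast_mul e d, ?_⟩
  omega

/-- **The type-2 exit of C11c** (0x114c6f, the fall-through of the store 0x114c6b): `In11V` from `In11P` at the entry, the footprint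
of the stretch, and the value read back from `[c + 28, c + 32)` = the 32-bit product of the two loaded fields. -/
theorem exit_type2 {u₀ : State} {g : Ghost} {i : Nat} {A2 A3 Ai : Arena} {A : Arena × List Obj} {pc : Word} {v w : State}
    {ws : List Span} (hat : In11P u₀ g i A2 A3 Ai A pc v)
    (hvb : 1 ≤ Codebook.value_bits v.mem (g.cb v.mem i) ∧ Codebook.value_bits v.mem (g.cb v.mem i) ≤ 16)
    (hs : Mem.SameExcept ws v.mem w.mem) (hun : ShadowUntouched v.mem w.mem)
    (hq : ∀ x, x ∈ ws → Win11c g (g.cb v.mem i) x)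
    (hrip : w.rip = Vorbis.L.start_decoder.at_114c6f) (hrsp : w.reg .rsp = v.reg .rsp) (hcode : CodeOK u₀ w.mem)
    (hinv : abiInv w) (hr14 : w.reg .r14 = v.reg .r14)
    (hne : ¬ Codebook.lookup_type v.mem (g.cb v.mem i) = 1)
    (hlv : w.mem.readLE (addr (g.cb v.mem i + 28)) 4 =
      (BitVec.ofNat 32 (v.mem.readLE (addr (g.cb v.mem i + 4)) 4) * BitVec.ofNat 32 (v.mem.readLE (addr (g.cb v.mem i)) 4)).toNat) :
    In11V u₀ g i A2 A3 Ai A w := by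
  obtain ⟨⟨hF, hC, hcb, hk15, e_dim, e_ent, e_mu⟩, e_lt, e_vb⟩ := carry11c hat hs hun hq hrip hrsp hcode hinv hr14
  have hE : Codebook.entries v.mem (g.cb v.mem i) = sint32 (v.mem.readLE (addr (g.cb v.mem i + 4)) 4) := by
    simp only [vacc, voff, Mem.i32, Mem.u32]
  have hD : Codebook.dimensions v.mem (g.cb v.mem i) = sint32 (v.mem.readLE (addr (g.cb v.mem i)) 4) := by
    simp only [vacc, voff, Mem.i32, Mem.u32, Nat.add_zero]
  have hLVw : Codebook.lookup_values w.mem (g.cb v.mem i) = w.mem.readLE (addr (g.cb v.mem i + 28)) 4 := by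
    simp only [vacc, voff, Mem.u32]
  have h0 := hat.k.k1.ent_nonneg
  have h1 := hat.k.k1.dim_pos
  have hp := hat.prod_le
  rw [hE] at h0
  rw [hD] at h1
  rw [hE, hD] at hp
  obtain ⟨hprod, hlt⟩ := prod32 _ _ (Mem.readLE_lt' v.mem _ 4) (Mem.readLE_lt' v.mem _ 4) h0 h1 hp
  rw [← hlv, ← hLVw, ← hE, ← hD] at hprod
  rw [← hlv, ← hLVw] at hlt
  exact
    { frame := hF
      cur := hC
      k := by rw [hcb]; exact hk15
      type_12 := by rw [hcb, e_lt]; exact hat.type_12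
      prod_le := by rw [hcb, e_ent, e_dim]; exact hat.prod_le
      noTemps := hat.noTemps
      mu0 := by rw [hcb, e_mu]; exact hat.mu0
      vb := by rw [hcb, e_vb]; exact hvb
      type1_lv := by
        rw [hcb, e_lt]
        intro h
        exact absurd h hne
      type2_lv := by
        rw [hcb, e_ent, e_dim]
        intro _
        exact hprod
      lv_lt := by rw [hcb]; exact hlt }

/-- **The type-1 exit of C11c** (0x114d1a, the return of lookup1_values): `At11T` from `In11P` at the entry and the footprint of the
stretch (the stack below `R` and the byte `sequence_p`: `lookup_values` is not stored on this arm). -/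
theorem exit_type1 {u₀ : State} {g : Ghost} {i : Nat} {A2 A3 Ai : Arena} {A : Arena × List Obj} {pc : Word} {v w : State}
    {ws : List Span} (hat : In11P u₀ g i A2 A3 Ai A pc v)
    (hvb : 1 ≤ Codebook.value_bits v.mem (g.cb v.mem i) ∧ Codebook.value_bits v.mem (g.cb v.mem i) ≤ 16)
    (hs : Mem.SameExcept ws v.mem w.mem) (hun : ShadowUntouched v.mem w.mem)
    (hq : ∀ x, x ∈ ws → (g.R - 408 ≤ x.lo ∧ x.hi ≤ g.R) ∨ (g.cb v.mem i + 26 ≤ x.lo ∧ x.hi ≤ g.cb v.mem i + 27))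
    (hrip : w.rip = Vorbis.L.start_decoder.cut159) (hrsp : w.reg .rsp = v.reg .rsp) (hcode : CodeOK u₀ w.mem)
    (hinv : abiInv w) (hr14 : w.reg .r14 = v.reg .r14)
    (hty : Codebook.lookup_type v.mem (g.cb v.mem i) = 1) :
    At11T u₀ g i w := by
  have hq' : ∀ x, x ∈ ws → Win11c g (g.cb v.mem i) x := by
    intro x hx
    have k := hq x hx
    unfold Win11c
    omega
  obtain ⟨⟨hF, hC, hcb, hk15, e_dim, e_ent, e_mu⟩, e_lt, e_vb⟩ := carry11c hat hs hun hq' hrip hrsp hcode hinv hr14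
  have hpos : Pos g A := Pos.of hat.frame hat.cur
  have hm0 : MInv g i A2 A3 Ai A v.mem := MInv.of hat.frame hat.cur
  have hcw := hm0.c_where
  have p1 := hpos.r_eq
  have p2 := hpos.ra_lo
  have p3 := hpos.ra_hi
  have e_lv : Codebook.lookup_values w.mem (g.cb v.mem i) = Codebook.lookup_values v.mem (g.cb v.mem i) := by
    have heq : Mem.EqOn (g.cb v.mem i + 28) (g.cb v.mem i + 32) v.mem w.mem := by
      apply hs.eqOn
      intro x hx
      have k := hq x hx
      omega
    simp only [vacc, voff]
    exact heq.u32 _ (Nat.le_refl _) (by omega) (by omega)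
  refine ⟨A, A2, A3, Ai, ?_, ?_, ?_⟩
  · exact
      { frame := hF
        cur := hC
        k := by rw [hcb]; exact hk15
        type_12 := by rw [hcb, e_lt]; exact hat.type_12
        prod_le := by rw [hcb, e_ent, e_dim]; exact hat.prod_le
        noTemps := hat.noTemps
        lv0 := by rw [hcb, e_lv]; exact hat.lv0
        mu0 := by rw [hcb, e_mu]; exact hat.mu0 }
  · rw [hcb, e_vb]
    exact hvb
  · rw [hcb, e_lt]
    exact hty

end Vorbis.Spec.start_decoder_C11c
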